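-- pv_equiv track=rewrite | github.com/C0DIC/WalleBot | Source/Utils/ReadBeforeAction.py | readBeforeAction
-- ===== SOURCE A (Python) =====
-- def readBeforeAction(text):
--     new_text = ''
--     if '[' in text or ']' in text:
--         for i in text:
--             if i == '[':
--                 new_text += i
--             if i != ']':
--                 new_text += i
--             else:
--                 break
--     return new_text
-- ===== SOURCE B (Python) =====
-- def readBeforeAction(text):
--     if '[' not in text and ']' not in text:
--         return ''
--     idx = text.find(']')
--     prefix = text if idx == -1 else text[:idx]
--     return prefix.replace('[', '[[')
-- ===== Notes on version B (the rewrite author's own statement) =====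
-- stated objective: simpler
-- what changed: Replaces the char-by-char accumulator loop with early break by locating the first ']' via find, slicing the prefix, and doubling '[' with a single str.replace, keeping A's empty-string guard when no bracket occurs.
import Mathlib
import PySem

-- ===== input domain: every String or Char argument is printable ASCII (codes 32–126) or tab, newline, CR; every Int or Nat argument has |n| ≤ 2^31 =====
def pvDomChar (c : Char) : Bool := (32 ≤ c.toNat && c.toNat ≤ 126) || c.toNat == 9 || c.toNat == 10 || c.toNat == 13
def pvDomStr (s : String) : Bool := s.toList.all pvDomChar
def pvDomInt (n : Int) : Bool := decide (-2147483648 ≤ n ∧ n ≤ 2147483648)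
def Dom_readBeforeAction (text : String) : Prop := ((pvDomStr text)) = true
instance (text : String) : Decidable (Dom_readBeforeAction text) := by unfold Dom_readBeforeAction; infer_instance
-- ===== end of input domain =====

-- B replaces A's char-by-char accumulator loop (doubling '[', breaking at ']') by find-the-']'
-- then slice then replace('[','[['); objective: simpler. Same return value on every input.

-- ===== PORT A =====
-- the for-loop: accumulator new_text as List Char, 'break' = the non-recursive branch
def readBeforeActionGo : List Char → List Char → List Char
  | [], acc => acc
  | c :: rest, acc =>
    let acc1 := if c = '[' then acc ++ [c] else acc
    if c ≠ ']' then readBeforeActionGo rest (acc1 ++ [c]) else acc1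

def readBeforeAction (text : String) : String :=
  if PySem.Str.isIn "[" text || PySem.Str.isIn "]" text then
    String.ofList (readBeforeActionGo text.toList [])
  else ""

-- ===== PORT B =====
def readBeforeAction_alt (text : String) : String :=
  if !(PySem.Str.isIn "[" text) && !(PySem.Str.isIn "]" text) then ""
  else
    let idx := PySem.Str.find text "]"
    let pre := if idx = -1 then text else PySem.Str.slice text none (some idx)
    PySem.Str.replace pre "[" "[["

-- ===== PRECONDITION & SPEC =====
def Spec_readBeforeAction (text : String) (out : String) : Prop := out = readBeforeAction_alt text
instance (text : String) (out : String) : Decidable (Spec_readBeforeAction text out) := by unfold Spec_readBeforeAction; infer_instance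

-- ===== CLAIM (what is proved, stated in full; the proofs are below) =====
def Claim_equal_readBeforeAction : Prop := ∀ (text : String), Dom_readBeforeAction text → Spec_readBeforeAction text (readBeforeAction text)

-- ===== LEMMAS AND PROOFS =====

-- doubling of a single char, the common currency of both sides
def pvDbl (c : Char) : List Char := if c = '[' then [c, c] else [c]

-- A's loop = double-'[' over the prefix before the first ']'
lemma readBeforeActionGo_eq (l acc : List Char) :
    readBeforeActionGo l acc =
      acc ++ (l.takeWhile (fun x => !decide (x = ']'))).flatMap pvDbl := by
  induction l generalizing acc with
  | nil => simp [readBeforeActionGo]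
  | cons c rest ih =>
    by_cases hc : c = ']'
    · subst hc
      simp [readBeforeActionGo]
    · by_cases hb : c = '['
      · subst hb
        simp [readBeforeActionGo, ih, pvDbl]
      · simp [readBeforeActionGo, hc, hb, ih, pvDbl]

-- find.go on the single-char needle ']' locates the takeWhile boundary
lemma find_go_spec (l : List Char) (k : Nat) :
    (PySem.Chars.find.go [']'] l k = -1 ∧
      l.takeWhile (fun x => !decide (x = ']')) = l) ∨
    (∃ j : Nat, PySem.Chars.find.go [']'] l k = ((k + j : Nat) : Int) ∧
      l.takeWhile (fun x => !decide (x = ']')) = l.take j) := by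
  induction l generalizing k with
  | nil => left; exact ⟨by simp [PySem.Chars.find.go], by simp⟩
  | cons c t ih =>
    by_cases hc : c = ']'
    · subst hc
      right
      exact ⟨0, by simp [PySem.Chars.find.go, List.isPrefixOf], by simp⟩
    · have hpre : List.isPrefixOf [']'] (c :: t) = false := by
        simp [List.isPrefixOf]; exact fun h => (hc h.symm).elim
      have hgo : PySem.Chars.find.go [']'] (c :: t) k = PySem.Chars.find.go [']'] t (k + 1) := by
        simp [PySem.Chars.find.go, hpre]
      have htw : (c :: t).takeWhile (fun x => !decide (x = ']')) =
          c :: t.takeWhile (fun x => !decide (x = ']')) := by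
        simp [hc]
      rcases ih (k + 1) with ⟨h1, h2⟩ | ⟨j, h1, h2⟩
      · left
        exact ⟨by rw [hgo, h1], by rw [htw, h2]⟩
      · right
        refine ⟨j + 1, ?_, ?_⟩
        · rw [hgo, h1]; push_cast; ring
        · rw [htw, h2, List.take_succ_cons]

-- B's prefix (find-then-slice) is the takeWhile prefix
lemma pre_eq (s : List Char) :
    (if PySem.Chars.find s [']'] = -1 then s
     else PySem.List.slice s none (some (PySem.Chars.find s [']']))) =
    s.takeWhile (fun x => !decide (x = ']')) := by
  rcases find_go_spec s 0 with ⟨h1, h2⟩ | ⟨j, h1, h2⟩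
  · have hf : PySem.Chars.find s [']'] = -1 := h1
    rw [if_pos hf]; exact h2.symm
  · have hf : PySem.Chars.find s [']'] = (j : Int) := by simpa using h1
    have hne : ((j : Int)) ≠ -1 := by omega
    rw [if_neg (by rw [hf]; exact hne), hf, PySem.List.slice_to_natCast, h2]

-- replace.go with old = "[" and new = "[[" is flatMap pvDbl
lemma replace_go_eq (l acc : List Char) (fuel : Nat) (h : l.length ≤ fuel) :
    PySem.Chars.replace.go ['['] ['[', '['] fuel l acc = acc.reverse ++ l.flatMap pvDbl := by
  induction l generalizing fuel acc with
  | nil => cases fuel <;> simp [PySem.Chars.replace.go]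
  | cons c t ih =>
    cases fuel with
    | zero => simp at h
    | succ f =>
      have hf : t.length ≤ f := by simpa using h
      by_cases hb : c = '['
      · subst hb
        have : List.isPrefixOf ['['] ('[' :: t) = true := by simp [List.isPrefixOf]
        simp [PySem.Chars.replace.go, this, ih _ _ hf, pvDbl]
      · have : List.isPrefixOf ['['] (c :: t) = false := by
          simp [List.isPrefixOf]; exact fun h => (hb h.symm).elim
        simp [PySem.Chars.replace.go, this, ih _ _ hf, pvDbl, hb]

lemma replace_single (l : List Char) :
    PySem.Chars.replace l ['['] ['[', '['] = l.flatMap pvDbl := by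
  simpa using replace_go_eq l [] l.length le_rfl

-- ===== VERDICT (by name: the statement is the Claim_ definition above) =====
theorem readBeforeAction_spec : Claim_equal_readBeforeAction := by
  intro text _
  unfold Spec_readBeforeAction readBeforeAction readBeforeAction_alt
  have hfind : PySem.Str.find text "]" = PySem.Chars.find text.toList [']'] := rfl
  cases ha : PySem.Str.isIn "[" text <;> cases hb : PySem.Str.isIn "]" text <;>
    simp only [ha, hb, Bool.false_or, Bool.or_false, Bool.true_or, Bool.or_true,
      Bool.not_false, Bool.not_true, Bool.and_self, Bool.false_and, Bool.and_false,
      Bool.true_and, Bool.and_true, if_true, if_false, Bool.false_eq_true, reduceIte]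
  all_goals
    rw [← String.toList_inj, String.toList_ofList, readBeforeActionGo_eq, List.nil_append,
      show PySem.Str.replace = fun s old new =>
        String.ofList (PySem.Chars.replace s.toList old.toList new.toList) from rfl]
    simp only [String.toList_ofList, hfind]
    rw [show ("[" : String).toList = ['['] from rfl,
      show ("[[" : String).toList = ['[', '['] from rfl,
      replace_single, ← pre_eq text.toList]
    by_cases h : PySem.Chars.find text.toList [']'] = -1
    · rw [if_pos h, if_pos h]
    · rw [if_neg h, if_neg h]
      simp
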